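-- pv_equiv track=rewrite | github.com/pgarrett-scripps/peptacular | src/peptacular/protein.py | digest_protein_sequence
-- ===== SOURCE A (Python) =====
-- from typing import Tuple, List, Any, Set, Dict, Generator, Union
--
-- def _get_spans(start_site: int, future_sites: List[int], missed_cleavages: int, last_sequence_index: int) -> \
--         List[Tuple[int, int, int]]:
--     """
--     The function computes the spans by taking the start_site and the first missed_cleavages number of elements
--     of future_sites and creating a tuple of start and end indices. If there are not enough elements in next_sites to
--     fill the missed_cleavages, the end index of the tuple is set to the last index of the sequence, last_sequence_index.
--     """
--
--     spans = []
--     for i, next_site in enumerate(future_sites[:missed_cleavages + 1]):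
--         spans.append((start_site, next_site, i))
--
--     if len(spans) != missed_cleavages + 1:
--         spans.append((start_site, last_sequence_index, len(spans)))
--
--     return spans
--
-- def digest_protein_sequence(protein_sequence: str, enzyme_sites: List[int], missed_cleaves: int, min_len: int,
--                             max_len: int) -> \
--         List[Tuple[str, int]]:
--     """
--     Digests a protein sequence according to the enzyme regex string and number of missed cleavages.
--     """
--
--     if len(enzyme_sites) == 0:
--         if min_len <= len(protein_sequence) <= max_len:
--             return [(protein_sequence, 0)]
--         else:
--             return []
--
--     peptide_spans = []
--
--     cur_site = 0
--     curr_enzyme_index = -1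
--     while True:
--         future_start_sites = enzyme_sites[curr_enzyme_index + 1:]
--         spans = _get_spans(cur_site, future_start_sites, missed_cleaves, len(protein_sequence))
--         peptide_spans.extend(spans)
--         curr_enzyme_index += 1
--
--         if curr_enzyme_index >= len(enzyme_sites):
--             break
--
--         cur_site = enzyme_sites[curr_enzyme_index]
--
--     peptides = []
--     for span in peptide_spans:
--         span_len = span[1] - span[0]
--         if min_len <= span_len <= max_len:
--             peptides.append((protein_sequence[span[0]:span[1]], span[2]))
--     return peptides
-- ===== SOURCE B (Python) =====
-- def digest_protein_sequence(protein_sequence, enzyme_sites, missed_cleaves, min_len, max_len):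
--     bounds = [0] + enzyme_sites + [len(protein_sequence)]
--     n = len(bounds)
--     buckets = [[] for _ in range(n - 1)]
--     for j in range(1, n):
--         end = bounds[j]
--         for i in range(max(0, j - 1 - missed_cleaves), j):
--             start = bounds[i]
--             if min_len <= end - start <= max_len:
--                 buckets[i].append((protein_sequence[start:end], j - 1 - i))
--     peptides = []
--     for bucket in buckets:
--         peptides.extend(bucket)
--     return peptides
-- ===== Notes on version B (the rewrite author's own statement) =====
-- stated objective: alternative
-- what changed: Transposes the traversal: instead of A's start-major while-loop with per-start slicing and the _get_spans sentinel helper, B makes one pass over cleavage ENDS, pairing each end with the window of at most missed_cleaves+1 preceding boundaries, accumulating peptides into per-start buckets that are concatenated at the end to restore A's start-major output order.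
-- outside the precondition, e.g. on digest_protein_sequence('AB', [], -1, 0, 10): A returns [('AB', 0)], B returns []; on digest_protein_sequence('ABCD', [2], -2, 0, 10): A returns [('ABCD', 0), ('CD', 0)], B returns []
import Mathlib
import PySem

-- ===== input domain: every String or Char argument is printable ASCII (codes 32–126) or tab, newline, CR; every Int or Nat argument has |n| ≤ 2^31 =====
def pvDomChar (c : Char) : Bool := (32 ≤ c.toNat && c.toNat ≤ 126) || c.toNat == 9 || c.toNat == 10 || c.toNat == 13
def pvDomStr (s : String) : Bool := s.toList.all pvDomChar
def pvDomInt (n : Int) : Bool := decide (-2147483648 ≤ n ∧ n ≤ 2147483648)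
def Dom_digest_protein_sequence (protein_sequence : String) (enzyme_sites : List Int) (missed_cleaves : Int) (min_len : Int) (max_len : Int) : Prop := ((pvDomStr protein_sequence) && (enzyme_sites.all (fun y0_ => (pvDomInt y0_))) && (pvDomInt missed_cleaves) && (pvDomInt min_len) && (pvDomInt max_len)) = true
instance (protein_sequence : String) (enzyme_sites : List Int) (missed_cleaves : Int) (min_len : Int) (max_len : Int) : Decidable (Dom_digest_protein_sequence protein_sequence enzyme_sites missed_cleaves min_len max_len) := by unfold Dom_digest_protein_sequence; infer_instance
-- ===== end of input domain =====

-- B transposes A's start-major while-loop (with its _get_spans sentinel helper and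
-- empty-sites special case) into one pass over cleavage ENDS that fills per-start
-- buckets, concatenated at the end (objective: alternative).

-- ===== PORT A =====
-- _get_spans: spans over the first missed_cleavages+1 future sites, with the sentinel fallback
def pvGetSpansA (start_site : Int) (future_sites : List Int) (missed_cleavages : Int)
    (last_sequence_index : Int) : List (Int × Int × Int) :=
  let spans := (PySem.List.enumerate (PySem.List.slice future_sites none (some (missed_cleavages + 1)))).foldl
      (fun acc p => acc ++ [(start_site, p.2, p.1)]) []
  if (spans.length : Int) ≠ missed_cleavages + 1 then
    spans ++ [(start_site, last_sequence_index, (spans.length : Int))]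
  else spans

-- the 'while True' loop of A; fuel = enzyme_sites.length + 1 is exactly the number of
-- iterations the loop performs (the 0 case is never reached)
def pvDigestLoopA (protein_sequence : String) (enzyme_sites : List Int) (missed_cleaves : Int)
    (cur_site : Int) (curr_enzyme_index : Int) (peptide_spans : List (Int × Int × Int)) :
    Nat → List (Int × Int × Int)
  | 0 => peptide_spans
  | fuel + 1 =>
    let future_start_sites := PySem.List.slice enzyme_sites (some (curr_enzyme_index + 1)) none
    let spans := pvGetSpansA cur_site future_start_sites missed_cleaves (PySem.Str.len protein_sequence)
    let peptide_spans' := peptide_spans ++ spans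
    let idx := curr_enzyme_index + 1
    if idx ≥ PySem.List.len enzyme_sites then peptide_spans'
    else pvDigestLoopA protein_sequence enzyme_sites missed_cleaves
        (PySem.List.pyGetD enzyme_sites idx 0) idx peptide_spans' fuel
        -- enzyme_sites[idx]: idx is in range here, pyGetD is exact

def digest_protein_sequence (protein_sequence : String) (enzyme_sites : List Int)
    (missed_cleaves : Int) (min_len : Int) (max_len : Int) : List (String × Int) :=
  if PySem.List.len enzyme_sites = 0 then
    if min_len ≤ PySem.Str.len protein_sequence ∧ PySem.Str.len protein_sequence ≤ max_len then
      [(protein_sequence, 0)]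
    else []
  else
    let peptide_spans := pvDigestLoopA protein_sequence enzyme_sites missed_cleaves 0 (-1) []
        (enzyme_sites.length + 1)
    peptide_spans.foldl (fun acc span =>
      let span_len := span.2.1 - span.1
      if min_len ≤ span_len ∧ span_len ≤ max_len then
        acc ++ [(PySem.Str.slice protein_sequence (some span.1) (some span.2.1), span.2.2)]
      else acc) []

-- ===== PORT B =====
def digest_protein_sequence_alt (protein_sequence : String) (enzyme_sites : List Int)
    (missed_cleaves : Int) (min_len : Int) (max_len : Int) : List (String × Int) :=
  let bounds : List Int := 0 :: (enzyme_sites ++ [PySem.Str.len protein_sequence])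
  let n : Int := PySem.List.len bounds
  let buckets0 : List (List (String × Int)) := (PySem.List.pyRange 0 (n - 1) 1).map (fun _ => [])
  let buckets := (PySem.List.pyRange 1 n 1).foldl (fun bks j =>
    let endv := PySem.List.pyGetD bounds j 0          -- bounds[j], j is in range here
    (PySem.List.pyRange (max 0 (j - 1 - missed_cleaves)) j 1).foldl (fun bks2 i =>
      let start := PySem.List.pyGetD bounds i 0       -- bounds[i], i is in range here
      if min_len ≤ endv - start ∧ endv - start ≤ max_len then
        bks2.set i.toNat ((bks2.getD i.toNat []) ++
          [(PySem.Str.slice protein_sequence (some start) (some endv), j - 1 - i)])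
      else bks2) bks) buckets0
  buckets.foldl (fun acc b => acc ++ b) []

-- ===== PRECONDITION & SPEC =====
-- Pre_ restricts to the function's natural domain 0 ≤ missed_cleaves: for a negative
-- missed-cleavage count A's slice future_sites[:missed_cleaves+1] wraps around from the end
-- (and the empty-enzyme_sites branch ignores the count entirely), so A returns accidental
-- spans there, while B naturally returns no peptides.
def Pre_digest_protein_sequence (protein_sequence : String) (enzyme_sites : List Int) (missed_cleaves : Int) (min_len : Int) (max_len : Int) : Prop := 0 ≤ missed_cleaves
instance (protein_sequence : String) (enzyme_sites : List Int) (missed_cleaves : Int) (min_len : Int) (max_len : Int) : Decidable (Pre_digest_protein_sequence protein_sequence enzyme_sites missed_cleaves min_len max_len) := by unfold Pre_digest_protein_sequence; infer_instance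

def pvWitness_digest_protein_sequence : String × List Int × Int × Int × Int := ("PEPTIDE", [3], 1, 1, 7)

def Spec_digest_protein_sequence (protein_sequence : String) (enzyme_sites : List Int) (missed_cleaves : Int) (min_len : Int) (max_len : Int) (out : List (String × Int)) : Prop := out = digest_protein_sequence_alt protein_sequence enzyme_sites missed_cleaves min_len max_len
instance (protein_sequence : String) (enzyme_sites : List Int) (missed_cleaves : Int) (min_len : Int) (max_len : Int) (out : List (String × Int)) : Decidable (Spec_digest_protein_sequence protein_sequence enzyme_sites missed_cleaves min_len max_len out) := by unfold Spec_digest_protein_sequence; infer_instance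

-- ===== CLAIM (what is proved, stated in full; the proofs are below) =====
def Claim_equal_digest_protein_sequence : Prop := ∀ (protein_sequence : String) (enzyme_sites : List Int) (missed_cleaves : Int) (min_len : Int) (max_len : Int), Dom_digest_protein_sequence protein_sequence enzyme_sites missed_cleaves min_len max_len → Pre_digest_protein_sequence protein_sequence enzyme_sites missed_cleaves min_len max_len → Spec_digest_protein_sequence protein_sequence enzyme_sites missed_cleaves min_len max_len (digest_protein_sequence protein_sequence enzyme_sites missed_cleaves min_len max_len)

-- ===== LEMMAS AND PROOFS =====

-- the augmented position list both programs' spans are indexed by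
def pvPos (sites : List Int) (plen : Int) : List Int := 0 :: (sites ++ [plen])

-- canonical span list: for each start index i, the spans (P[i], P[i+1+m], m)
def pvSpanList (sites : List Int) (plen : Int) (missed : Int) : List (Int × Int × Int) :=
  (List.range (sites.length + 1)).flatMap (fun i =>
    (List.range (min (missed + 1).toNat (sites.length + 1 - i))).map
      (fun m => ((pvPos sites plen).getD i 0, (pvPos sites plen).getD (i + 1 + m) 0, (m : Int))))

def pvEmit (protein : String) (mn mx : Int) (sp : Int × Int × Int) : List (String × Int) :=
  if mn ≤ sp.2.1 - sp.1 ∧ sp.2.1 - sp.1 ≤ mx then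
    [(PySem.Str.slice protein (some sp.1) (some sp.2.1), sp.2.2)]
  else []

theorem pv_getD_drop (l : List Int) (s k : Nat) (d : Int) :
    (l.drop s).getD k d = l.getD (s + k) d := by
  simp [List.getD_eq_getElem?_getD, List.getElem?_drop]

theorem pv_flatMap_congr {α β : Type} (l : List α) (f g : α → List β)
    (h : ∀ x ∈ l, f x = g x) : l.flatMap f = l.flatMap g := by
  induction l with
  | nil => rfl
  | cons x xs ih =>
    simp only [List.flatMap_cons]
    rw [h x (by simp), ih (fun y hy => h y (by simp [hy]))]

theorem pv_filter_map_flatMap (protein : String) (mn mx : Int) (l : List (Int × Int × Int)) :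
    (l.filter (fun sp => decide (mn ≤ sp.2.1 - sp.1 ∧ sp.2.1 - sp.1 ≤ mx))).map
        (fun sp => (PySem.Str.slice protein (some sp.1) (some sp.2.1), sp.2.2))
      = l.flatMap (pvEmit protein mn mx) := by
  induction l with
  | nil => rfl
  | cons x xs ih =>
    rw [List.flatMap_cons, List.filter_cons]
    by_cases h : mn ≤ x.2.1 - x.1 ∧ x.2.1 - x.1 ≤ mx
    · rw [if_pos (by simpa using h), List.map_cons, ih]
      simp [pvEmit, h]
    · rw [if_neg (by simpa using h), ih]
      have he : pvEmit protein mn mx x = [] := by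
        simp only [pvEmit]
        rw [if_neg h]
      rw [he, List.nil_append]

theorem pv_slice_full (s : String) :
    PySem.Str.slice s (some 0) (some (PySem.Str.len s)) = s := by
  apply String.toList_inj.mp
  simp [pysem]

theorem pv_getSpans_eq (start : Int) (future : List Int) (missed : Int) (hm : 0 ≤ missed)
    (last : Int) :
    pvGetSpansA start future missed last =
      (List.range (min (missed + 1).toNat (future.length + 1))).map
        (fun k => (start, (future ++ [last]).getD k 0, (k : Int))) := by
  unfold pvGetSpansA
  have hs : PySem.List.slice future none (some (missed + 1)) = future.take (missed + 1).toNat :=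
    PySem.List.slice_to _ (by omega)
  rw [hs]
  rw [PySem.List.foldl_append_singleton_eq_map]
  simp only [List.nil_append]
  set M := (missed + 1).toNat with hM
  have hM1 : 1 ≤ M := by omega
  by_cases h : M ≤ future.length
  · have hlen : (future.take M).length = M := by simp [h]
    have hcond : ¬ ((((PySem.List.enumerate (future.take M)).map (fun p => (start, p.2, p.1))).length : Int) ≠ missed + 1) := by
      simp [PySem.List.length_enumerate, hlen]; omega
    rw [if_neg hcond]
    have hmin : min M (future.length + 1) = M := by omega
    rw [hmin]
    apply List.ext_getElem
    · simp [PySem.List.length_enumerate, hlen]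
    · intro k hk1 hk2
      simp only [List.getElem_map, PySem.List.getElem_enumerate, List.getElem_range]
      have hkM : k < M := by simpa [PySem.List.length_enumerate, hlen] using hk1
      have : (future.take M)[k]'(by omega) = future[k]'(by omega) := List.getElem_take
      rw [this]
      rw [List.getD_eq_getElem?_getD, List.getElem?_append_left (by omega : k < future.length)]
      simp [(by omega : k < future.length)]
  · have htake : future.take M = future := List.take_of_length_le (by omega)
    rw [htake]
    have hcond : (((PySem.List.enumerate future).map (fun p => (start, p.2, p.1))).length : Int) ≠ missed + 1 := by
      simp [PySem.List.length_enumerate]; omega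
    rw [if_pos hcond]
    have hmin : min M (future.length + 1) = future.length + 1 := by omega
    rw [hmin, List.range_succ, List.map_append]
    congr 1
    · apply List.ext_getElem
      · simp [PySem.List.length_enumerate]
      · intro k hk1 hk2
        simp only [List.getElem_map, PySem.List.getElem_enumerate, List.getElem_range]
        have hkf : k < future.length := by simpa [PySem.List.length_enumerate] using hk1
        rw [List.getD_eq_getElem?_getD, List.getElem?_append_left hkf]
        simp [hkf]
    · simp [PySem.List.length_enumerate]

theorem pv_loopA_eq (protein : String) (sites : List Int) (missed : Int) :
    ∀ (k t : Nat), t ≤ sites.length → sites.length - t = k →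
    ∀ acc : List (Int × Int × Int),
    pvDigestLoopA protein sites missed ((pvPos sites (PySem.Str.len protein)).getD t 0)
        ((t : Int) - 1) acc (sites.length + 1 - t)
      = acc ++ (List.range (sites.length + 1 - t)).flatMap
          (fun s => pvGetSpansA ((pvPos sites (PySem.Str.len protein)).getD (t + s) 0)
            (sites.drop (t + s)) missed (PySem.Str.len protein)) := by
  intro k
  induction k with
  | zero =>
    intro t ht hk acc
    have ht' : t = sites.length := by omega
    subst ht'
    have h1 : sites.length + 1 - sites.length = 1 := by omega
    rw [h1]
    simp only [pvDigestLoopA]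
    have hidx : (sites.length : Int) - 1 + 1 = (sites.length : Int) := by ring
    rw [hidx]
    have hslice : PySem.List.slice sites (some ((sites.length : Int))) none = sites.drop sites.length :=
      PySem.List.slice_from_natCast sites sites.length
    rw [hslice]
    rw [if_pos (by simp)]
    simp
  | succ k ih =>
    intro t ht hk acc
    have h1 : sites.length + 1 - t = (sites.length - t) + 1 := by omega
    rw [h1]
    simp only [pvDigestLoopA]
    have hidx : (t : Int) - 1 + 1 = (t : Int) := by ring
    rw [hidx]
    have hslice : PySem.List.slice sites (some ((t : Int))) none = sites.drop t :=
      PySem.List.slice_from_natCast sites t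
    rw [hslice]
    have htlt : t < sites.length := by omega
    rw [if_neg (by simp; exact_mod_cast htlt)]
    have hcur : PySem.List.pyGetD sites (t : Int) 0 = (pvPos sites (PySem.Str.len protein)).getD (t+1) 0 := by
      simp [pvPos, List.getD_eq_getElem?_getD, List.getElem?_append_left htlt]
    rw [hcur]
    rw [show ((t : Int)) = ((t+1 : Nat) : Int) - 1 from by push_cast; ring]
    rw [show sites.length - t = sites.length + 1 - (t+1) from by omega]
    rw [ih (t+1) (by omega) (by omega)
      (acc ++ pvGetSpansA ((pvPos sites (PySem.Str.len protein)).getD t 0) (sites.drop t) missed (PySem.Str.len protein))]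
    rw [show sites.length + 1 - (t+1) = k + 1 from by omega]
    rw [show (k : Nat) + 1 + 1 = k + 2 from rfl]
    conv_rhs => rw [List.range_succ_eq_map, List.flatMap_cons, List.flatMap_map]
    simp only [Nat.add_zero, List.append_assoc]
    congr 2
    congr 1
    funext s
    congr 2 <;> omega

theorem pv_spans_eq (sites : List Int) (plen missed : Int) (hm : 0 ≤ missed) :
    (List.range (sites.length + 1)).flatMap
        (fun s => pvGetSpansA ((pvPos sites plen).getD s 0) (sites.drop s) missed plen)
      = pvSpanList sites plen missed := by
  unfold pvSpanList
  apply pv_flatMap_congr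
  intro s hs
  have hsle : s ≤ sites.length := Nat.lt_succ_iff.mp (List.mem_range.mp hs)
  rw [pv_getSpans_eq _ _ _ hm]
  rw [List.length_drop]
  have hmin : min (missed + 1).toNat (sites.length - s + 1)
      = min (missed + 1).toNat (sites.length + 1 - s) := by omega
  rw [hmin]
  apply List.map_congr_left
  intro k _
  have hend : (sites.drop s ++ [plen]).getD k 0 = (pvPos sites plen).getD (s + 1 + k) 0 := by
    rw [← List.drop_append_of_le_length hsle, pv_getD_drop]
    have : s + 1 + k = (s + k) + 1 := by omega
    rw [this]
    simp [pvPos]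
  rw [hend]

theorem pv_A_eq (protein : String) (sites : List Int) (missed mn mx : Int) (hm : 0 ≤ missed) :
    digest_protein_sequence protein sites missed mn mx
      = (pvSpanList sites (PySem.Str.len protein) missed).flatMap (pvEmit protein mn mx) := by
  unfold digest_protein_sequence
  by_cases hsites : sites = []
  · subst hsites
    rw [if_pos (by simp [PySem.List.len])]
    have hone : min (missed + 1).toNat 1 = 1 := by omega
    have hspan : pvSpanList [] (PySem.Str.len protein) missed = [(0, PySem.Str.len protein, 0)] := by
      simp [pvSpanList, pvPos, hone]
    rw [hspan]
    have hemit : pvEmit protein mn mx (0, (protein.length : Int), 0)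
        = if mn ≤ (protein.length : Int) ∧ (protein.length : Int) ≤ mx then [(protein, 0)] else [] := by
      have hsf := pv_slice_full protein
      simp only [PySem.Str.len_eq, String.length_toList] at hsf
      simp only [pvEmit, sub_zero]
      rw [hsf]
    simp [hemit]
  · rw [if_neg (by simp [PySem.List.len_eq, hsites])]
    have hloop := pv_loopA_eq protein sites missed sites.length 0 (by omega) (by omega) []
    have h0 : (pvPos sites (PySem.Str.len protein)).getD 0 0 = 0 := by simp [pvPos]
    rw [h0] at hloop
    rw [Nat.sub_zero, Nat.cast_zero, zero_sub] at hloop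
    simp only [Nat.zero_add, List.nil_append] at hloop
    rw [hloop]
    rw [PySem.List.foldl_append_ite
      (p := fun sp : Int × Int × Int => mn ≤ sp.2.1 - sp.1 ∧ sp.2.1 - sp.1 ≤ mx)
      (f := fun sp : Int × Int × Int => (PySem.Str.slice protein (some sp.1) (some sp.2.1), sp.2.2))]
    rw [List.nil_append, pv_filter_map_flatMap]
    rw [pv_spans_eq sites (PySem.Str.len protein) missed hm]

-- ===== B-side lemmas: the bucket loop =====

-- B's outer-loop body, named for the proofs (definitionally the port's lambda)
def pvStepB (protein : String) (sites : List Int) (missed mn mx : Int)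
    (bks : List (List (String × Int))) (j : Int) : List (List (String × Int)) :=
  let bounds : List Int := 0 :: (sites ++ [PySem.Str.len protein])
  let endv := PySem.List.pyGetD bounds j 0
  (PySem.List.pyRange (max 0 (j - 1 - missed)) j 1).foldl (fun bks2 i =>
    let start := PySem.List.pyGetD bounds i 0
    if mn ≤ endv - start ∧ endv - start ≤ mx then
      bks2.set i.toNat ((bks2.getD i.toNat []) ++
        [(PySem.Str.slice protein (some start) (some endv), j - 1 - i)])
    else bks2) bks

-- bucket i after the ends 1..J have been processed
def pvBucket (protein : String) (sites : List Int) (missed mn mx : Int) (J i : Nat) :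
    List (String × Int) :=
  ((List.range (min (missed + 1).toNat (J - i))).map
    (fun m => ((pvPos sites (PySem.Str.len protein)).getD i 0,
               (pvPos sites (PySem.Str.len protein)).getD (i + 1 + m) 0, (m : Int)))).flatMap
    (pvEmit protein mn mx)

theorem pv_map_getD {α : Type} (l : List α) (d : α) :
    (List.range l.length).map (fun t => l.getD t d) = l := by
  apply List.ext_getElem
  · simp
  · intro k hk1 hk2
    simp [List.getD_eq_getElem?_getD, List.getElem?_eq_getElem hk2]

-- the inner fold over the start window, characterized elementwise
theorem pv_inner_fold {α : Type} (g : Int → List α) (c : Int → Prop) [DecidablePred c] :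
    ∀ (cnt : Nat) (lo : Int) (bks : List (List α)), 0 ≤ lo →
    (PySem.List.pyRange lo (lo + (cnt : Int)) 1).foldl
        (fun b i => if c i then b.set i.toNat ((b.getD i.toNat []) ++ g i) else b) bks
      = (List.range bks.length).map (fun t => (bks.getD t []) ++
          (if lo ≤ (t : Int) ∧ (t : Int) < lo + (cnt : Int) ∧ c (t : Int) then g (t : Int) else [])) := by
  intro cnt
  induction cnt with
  | zero =>
    intro lo bks hlo
    rw [show lo + ((0 : Nat) : Int) = lo from by push_cast; ring]
    rw [PySem.List.pyRange_one_eq_nil le_rfl]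
    simp only [List.foldl_nil]
    have h0 : ∀ t ∈ List.range bks.length,
        (bks.getD t []) ++ (if lo ≤ (t : Int) ∧ (t : Int) < lo ∧ c (t : Int) then g (t : Int) else [])
          = bks.getD t [] := by
      intro t _
      rw [if_neg (fun h => absurd h.2.1 (by omega)), List.append_nil]
    rw [List.map_congr_left h0, pv_map_getD]
  | succ cnt ih =>
    intro lo bks hlo
    have hlt : lo < lo + ((cnt + 1 : Nat) : Int) := by push_cast; omega
    rw [PySem.List.pyRange_one_cons hlt, List.foldl_cons]
    have hcast : lo + ((cnt + 1 : Nat) : Int) = (lo + 1) + ((cnt : Nat) : Int) := by push_cast; ring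
    rw [hcast]
    set bks1 := (if c lo then bks.set lo.toNat ((bks.getD lo.toNat []) ++ g lo) else bks) with hbks1
    have hlen1 : bks1.length = bks.length := by
      rw [hbks1]; split_ifs <;> simp
    rw [ih (lo + 1) bks1 (by omega), hlen1]
    apply List.ext_getElem
    · simp
    · intro t ht1 ht2
      simp only [List.getElem_map, List.getElem_range]
      have htlen : t < bks.length := by simpa using ht1
      have hget1 : bks1.getD t [] =
          if c lo ∧ (t : Int) = lo then (bks.getD t []) ++ g lo else bks.getD t [] := by
        rw [hbks1]
        split_ifs with h1 h2 h2
        · have ht' : (t : Int) = lo := h2.2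
          have hteq : lo.toNat = t := by omega
          subst hteq
          rw [List.getD_eq_getElem?_getD, List.getElem?_set_self (by omega)]
          simp
        · have ht' : (t : Int) ≠ lo := fun he => h2 ⟨h1, he⟩
          have hne : lo.toNat ≠ t := by omega
          rw [List.getD_eq_getElem?_getD, List.getElem?_set_ne hne,
            ← List.getD_eq_getElem?_getD]
        · exact absurd h2.1 h1
        · rfl
      rw [hget1]
      by_cases hteq : (t : Int) = lo
      · by_cases hc : c lo
        · rw [if_pos ⟨hc, hteq⟩]
          rw [if_neg (fun h => absurd h.1 (by omega))]
          rw [if_pos ⟨by omega, by omega, by rw [hteq]; exact hc⟩]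
          rw [List.append_nil, hteq]
        · rw [if_neg (fun h => hc h.1)]
          rw [if_neg (fun h => absurd h.1 (by omega))]
          rw [if_neg (fun h => hc (by rw [← hteq]; exact h.2.2))]
      · rw [if_neg (fun h => hteq h.2)]
        by_cases hw : lo + 1 ≤ (t : Int) ∧ (t : Int) < lo + 1 + ((cnt : Nat) : Int) ∧ c (t : Int)
        · obtain ⟨h1, h2, h3⟩ := hw
          rw [if_pos ⟨h1, h2, h3⟩, if_pos ⟨by omega, by omega, h3⟩]
        · rw [if_neg hw, if_neg (fun h => hw ⟨by omega, by omega, h.2.2⟩)]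

-- pv_inner_fold restated with an arbitrary upper bound hi
theorem pv_inner_fold' {α : Type} (g : Int → List α) (c : Int → Prop) [DecidablePred c]
    (lo hi : Int) (bks : List (List α)) (hlo : 0 ≤ lo) (hhi : lo ≤ hi) :
    (PySem.List.pyRange lo hi 1).foldl
        (fun b i => if c i then b.set i.toNat ((b.getD i.toNat []) ++ g i) else b) bks
      = (List.range bks.length).map (fun t => (bks.getD t []) ++
          (if lo ≤ (t : Int) ∧ (t : Int) < hi ∧ c (t : Int) then g (t : Int) else [])) := by
  have h : hi = lo + (((hi - lo).toNat : Nat) : Int) := by omega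
  rw [h]
  exact pv_inner_fold g c (hi - lo).toNat lo bks hlo

-- the list of end boundaries 1..J as Ints (the shape pyRange 1 (J+1) 1 reduces to)
def pvEnds (J : Nat) : List Int := (List.range J).map (fun k : Nat => 1 + (k : Int))

theorem pvEnds_succ (J : Nat) : pvEnds (J + 1) = pvEnds J ++ [1 + (J : Int)] := by
  unfold pvEnds
  rw [List.range_succ]
  simp

-- after ends 1..J, the buckets are exactly pvBucket … J
theorem pv_outer_fold (protein : String) (sites : List Int) (missed mn mx : Int)
    (hm : 0 ≤ missed) :
    ∀ J : Nat, J ≤ sites.length + 1 →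
    (pvEnds J).foldl
        (pvStepB protein sites missed mn mx)
        ((List.range (sites.length + 1)).map (fun _ => []))
      = (List.range (sites.length + 1)).map (fun i => pvBucket protein sites missed mn mx J i) := by
  intro J
  induction J with
  | zero =>
    intro _
    simp only [pvEnds, List.range_zero, List.map_nil, List.foldl_nil]
    apply List.map_congr_left
    intro i _
    simp [pvBucket]
  | succ J ih =>
    intro hJ
    rw [pvEnds_succ, List.foldl_append]
    rw [ih (by omega)]
    simp only [List.foldl_cons, List.foldl_nil]
    unfold pvStepB
    simp only []
    have hjcast : (1 : Int) + (J : Int) = ((J + 1 : Nat) : Int) := by push_cast; ring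
    rw [hjcast]
    set P : List Int := 0 :: (sites ++ [PySem.Str.len protein]) with hP
    set L := sites.length with hL
    have hendv : PySem.List.pyGetD P ((J + 1 : Nat) : Int) 0 = P.getD (J + 1) 0 :=
      PySem.List.pyGetD_natCast P (J + 1) 0
    rw [hendv]
    set lo : Int := max 0 (((J + 1 : Nat) : Int) - 1 - missed) with hlo
    have hlo0 : 0 ≤ lo := by omega
    have hloJ : lo ≤ ((J + 1 : Nat) : Int) := by push_cast; omega
    rw [pv_inner_fold'
      (g := fun i => [(PySem.Str.slice protein (some (PySem.List.pyGetD P i 0)) (some (P.getD (J + 1) 0)),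
        ((J + 1 : Nat) : Int) - 1 - i)])
      (c := fun i => mn ≤ P.getD (J + 1) 0 - PySem.List.pyGetD P i 0 ∧
        P.getD (J + 1) 0 - PySem.List.pyGetD P i 0 ≤ mx)
      lo (((J + 1 : Nat) : Int)) _ hlo0 hloJ]
    rw [List.length_map, List.length_range]
    apply List.map_congr_left
    intro t htmem
    have htL : t < L + 1 := List.mem_range.mp htmem
    have hgetDt : (((List.range (L + 1)).map (fun i => pvBucket protein sites missed mn mx J i)).getD t [])
        = pvBucket protein sites missed mn mx J t := by
      rw [List.getD_eq_getElem?_getD, List.getElem?_map, List.getElem?_range htL]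
      rfl
    rw [hgetDt]
    have hpy_t : PySem.List.pyGetD P ((t : Nat) : Int) 0 = P.getD t 0 :=
      PySem.List.pyGetD_natCast P t 0
    -- fold the guarded append into pvEmit of the span ending at boundary J+1
    have hsplit : (if lo ≤ (t : Int) ∧ (t : Int) < ((J + 1 : Nat) : Int) ∧
          (mn ≤ P.getD (J + 1) 0 - PySem.List.pyGetD P (t : Int) 0 ∧
           P.getD (J + 1) 0 - PySem.List.pyGetD P (t : Int) 0 ≤ mx)
        then [(PySem.Str.slice protein (some (PySem.List.pyGetD P (t : Int) 0)) (some (P.getD (J + 1) 0)),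
          ((J + 1 : Nat) : Int) - 1 - (t : Int))]
        else [])
        = (if lo ≤ (t : Int) ∧ (t : Int) < ((J + 1 : Nat) : Int)
           then pvEmit protein mn mx (P.getD t 0, P.getD (J + 1) 0, ((J : Int) - (t : Int)))
           else []) := by
      rw [hpy_t]
      by_cases hwin : lo ≤ (t : Int) ∧ (t : Int) < ((J + 1 : Nat) : Int)
      · rw [if_pos hwin]
        simp only [pvEmit]
        by_cases hc : mn ≤ P.getD (J + 1) 0 - P.getD t 0 ∧ P.getD (J + 1) 0 - P.getD t 0 ≤ mx
        · rw [if_pos ⟨hwin.1, hwin.2, hc⟩, if_pos hc]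
          have : ((J + 1 : Nat) : Int) - 1 - (t : Int) = (J : Int) - (t : Int) := by push_cast; ring
          rw [this]
        · rw [if_neg (fun h => hc h.2.2), if_neg hc]
      · rw [if_neg (fun h => hwin ⟨h.1, h.2.1⟩), if_neg hwin]
    rw [hsplit]
    -- now pure bucket arithmetic: pvBucket J t ++ (window element) = pvBucket (J+1) t
    unfold pvBucket
    have hPpos : pvPos sites (PySem.Str.len protein) = P := rfl
    rw [hPpos]
    by_cases hwin : lo ≤ (t : Int) ∧ (t : Int) < ((J + 1 : Nat) : Int)
    · rw [if_pos hwin]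
      have htJ : t ≤ J := by
        have := hwin.2; omega
      have hkm : (J : Int) - (t : Int) ≤ missed := by
        have h4 := le_max_right (0 : Int) (((J + 1 : Nat) : Int) - 1 - missed)
        rw [← hlo] at h4
        have h1 := hwin.1
        push_cast at h4
        omega
      have hmin1 : min (missed + 1).toNat (J - t) = J - t := by omega
      have hmin2 : min (missed + 1).toNat (J + 1 - t) = (J - t) + 1 := by omega
      rw [hmin1, hmin2, List.range_succ, List.map_append, List.flatMap_append]
      congr 1
      simp only [List.map_cons, List.map_nil, List.flatMap_cons, List.flatMap_nil, List.append_nil]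
      have hidx : t + 1 + (J - t) = J + 1 := by omega
      rw [hidx]
      have hm2 : (((J - t : Nat)) : Int) = (J : Int) - (t : Int) := by omega
      rw [hm2]
    · rw [if_neg hwin, List.append_nil]
      have hminEq : min (missed + 1).toNat (J - t) = min (missed + 1).toNat (J + 1 - t) := by
        rcases not_and_or.mp hwin with h | h
        · have h3 : (t : Int) < lo := not_le.mp h
          rcases max_choice (0 : Int) (((J + 1 : Nat) : Int) - 1 - missed) with hm0 | hm1
          · rw [hlo, hm0] at h3; omega
          · rw [hlo, hm1] at h3
            push_cast at h3
            omega
        · have h6 : ((J + 1 : Nat) : Int) ≤ (t : Int) := not_lt.mp h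
          push_cast at h6
          omega
      rw [hminEq]

theorem pv_B_eq (protein : String) (sites : List Int) (missed mn mx : Int) (hm : 0 ≤ missed) :
    digest_protein_sequence_alt protein sites missed mn mx
      = (pvSpanList sites (PySem.Str.len protein) missed).flatMap (pvEmit protein mn mx) := by
  unfold digest_protein_sequence_alt
  simp only []
  have hn : PySem.List.len ((0 : Int) :: (sites ++ [PySem.Str.len protein]))
      = ((sites.length + 2 : Nat) : Int) := by
    rw [PySem.List.len_eq]; simp; push_cast; ring
  rw [hn]
  have hn1 : ((sites.length + 2 : Nat) : Int) - 1 = ((sites.length + 1 : Nat) : Int) := by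
    push_cast; ring
  rw [hn1]
  have hb0 : (PySem.List.pyRange 0 ((sites.length + 1 : Nat) : Int) 1).map
        (fun _ => ([] : List (String × Int)))
      = (List.range (sites.length + 1)).map (fun _ => ([] : List (String × Int))) := by
    rw [PySem.List.pyRange_zero_natCast, List.map_map]
    rfl
  rw [hb0]
  have hrange : PySem.List.pyRange 1 ((sites.length + 2 : Nat) : Int) 1
      = pvEnds (sites.length + 1) := by
    rw [PySem.List.pyRange_one]
    have ht : (((sites.length + 2 : Nat) : Int) - 1).toNat = sites.length + 1 := by omega
    rw [ht]
    rfl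
  rw [hrange]
  have hstep : (fun (bks : List (List (String × Int))) (j : Int) =>
      (PySem.List.pyRange (max 0 (j - 1 - missed)) j 1).foldl (fun bks2 i =>
        if mn ≤ PySem.List.pyGetD ((0 : Int) :: (sites ++ [PySem.Str.len protein])) j 0 -
              PySem.List.pyGetD ((0 : Int) :: (sites ++ [PySem.Str.len protein])) i 0 ∧
            PySem.List.pyGetD ((0 : Int) :: (sites ++ [PySem.Str.len protein])) j 0 -
              PySem.List.pyGetD ((0 : Int) :: (sites ++ [PySem.Str.len protein])) i 0 ≤ mx then
          bks2.set i.toNat ((bks2.getD i.toNat []) ++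
            [(PySem.Str.slice protein
                (some (PySem.List.pyGetD ((0 : Int) :: (sites ++ [PySem.Str.len protein])) i 0))
                (some (PySem.List.pyGetD ((0 : Int) :: (sites ++ [PySem.Str.len protein])) j 0)),
              j - 1 - i)])
        else bks2) bks) = pvStepB protein sites missed mn mx := rfl
  rw [hstep]
  rw [pv_outer_fold protein sites missed mn mx hm (sites.length + 1) le_rfl]
  rw [PySem.List.foldl_append_eq_flatMap (g := fun b => b)]
  rw [List.nil_append, List.flatMap_map]
  unfold pvSpanList
  rw [List.flatMap_assoc]
  apply pv_flatMap_congr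
  intro i _
  rfl

-- ===== VERDICT (by name: the statement is the Claim_ definition above) =====
theorem digest_protein_sequence_spec : Claim_equal_digest_protein_sequence := by
  intro protein sites missed mn mx _ hpre
  unfold Spec_digest_protein_sequence
  rw [pv_A_eq protein sites missed mn mx hpre, pv_B_eq protein sites missed mn mx hpre]
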